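-- pv_equiv track=rewrite | github.com/GalleyBytes/Tf3 | task-container-build-tools/build/builder.py | manifest_contains_archs
-- ===== SOURCE A (Python) =====
-- def manifest_contains_archs(data, desired_architectures):
--     manifests = data.get("manifests")
--     if manifests is None:
--         return False
--
--     architectures = []
--     for manifest in manifests:
--         platform = manifest.get("platform", {})
--
--         architectures.append(f"{platform.get('os', 'unknown')}/{platform.get('architecture', 'unknown')}")
--
--     for architecture in desired_architectures:
--         if architecture not in architectures:
--             return False
--
--     return True
-- ===== SOURCE B (Python) =====
-- def _arch_key(manifest):
--     platform = manifest.get("platform", {})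
--     return f"{platform.get('os', 'unknown')}/{platform.get('architecture', 'unknown')}"
--
--
-- def manifest_contains_archs(data, desired_architectures):
--     manifests = data.get("manifests")
--     if manifests is None:
--         return False
--
--     keys = sorted(_arch_key(m) for m in manifests)
--     need = sorted(set(desired_architectures))
--
--     i = 0
--     for k in keys:
--         if i < len(need) and need[i] == k:
--             i += 1
--     return i == len(need)
-- ===== Notes on version B (the rewrite author's own statement) =====
-- stated objective: alternative
-- what changed: Replaced A's build-a-list-then-scan-per-desired-arch design with sort-and-merge: sort the manifests' os/arch keys, sort the deduplicated desired architectures, and run a single two-pointer merge pass that advances through the sorted requirements, returning whether the pointer reached the end.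
import Mathlib
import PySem

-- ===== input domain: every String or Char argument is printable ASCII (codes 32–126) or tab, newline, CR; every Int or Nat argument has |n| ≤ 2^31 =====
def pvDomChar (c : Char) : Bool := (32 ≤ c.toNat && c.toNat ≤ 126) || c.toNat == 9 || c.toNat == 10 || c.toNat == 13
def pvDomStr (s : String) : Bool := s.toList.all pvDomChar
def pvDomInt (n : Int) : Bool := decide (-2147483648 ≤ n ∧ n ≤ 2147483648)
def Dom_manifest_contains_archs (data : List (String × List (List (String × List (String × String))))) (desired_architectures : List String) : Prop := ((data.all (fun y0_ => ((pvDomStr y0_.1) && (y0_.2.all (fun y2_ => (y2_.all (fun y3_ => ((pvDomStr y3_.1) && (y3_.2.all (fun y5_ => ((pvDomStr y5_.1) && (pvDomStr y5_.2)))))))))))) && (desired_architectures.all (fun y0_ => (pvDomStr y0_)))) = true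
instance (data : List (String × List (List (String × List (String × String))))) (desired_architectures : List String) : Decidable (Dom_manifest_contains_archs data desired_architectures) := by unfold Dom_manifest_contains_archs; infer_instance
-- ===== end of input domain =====

-- B replaces A's build-a-list-then-scan-per-desired design by sort-and-merge: sort the
-- manifests' os/arch keys and the deduplicated desired architectures, then one two-pointer
-- merge pass decides coverage (alternative algorithm).

-- the os/arch key of one manifest, shared helper text of both Pythons (f"{os}/{arch}" with 'unknown' defaults)
def pvArchKey (manifest : List (String × List (String × String))) : String :=
  let platform := (PySem.Dict.mk manifest).getD "platform" []
  (PySem.Dict.mk platform).getD "os" "unknown" ++ "/" ++ (PySem.Dict.mk platform).getD "architecture" "unknown"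

-- ===== PORT A =====
def manifest_contains_archs (data : List (String × List (List (String × List (String × String))))) (desired_architectures : List String) : Bool :=
  match (PySem.Dict.mk data).get? "manifests" with
  | none => false
  | some manifests =>
    let architectures := manifests.foldl (fun acc manifest => acc ++ [pvArchKey manifest]) []
    desired_architectures.all (fun architecture => architectures.contains architecture)

-- ===== PORT B =====
def manifest_contains_archs_alt (data : List (String × List (List (String × List (String × String))))) (desired_architectures : List String) : Bool :=
  match (PySem.Dict.mk data).get? "manifests" with
  | none => false
  | some manifests =>
    let keys := PySem.List.sorted (manifests.map pvArchKey) (fun x => x) false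
    let need := PySem.List.sorted (PySem.Set.ofList desired_architectures) (fun x => x) false
    -- 'need[i]? = some k' is Source B's 'i < len(need) and need[i] == k' in one Option test
    let i := keys.foldl (fun i k => if need[i]? = some k then i + 1 else i) 0
    i == need.length

-- ===== PRECONDITION & SPEC =====
def Spec_manifest_contains_archs (data : List (String × List (List (String × List (String × String))))) (desired_architectures : List String) (out : Bool) : Prop := out = manifest_contains_archs_alt data desired_architectures
instance (data : List (String × List (List (String × List (String × String))))) (desired_architectures : List String) (out : Bool) : Decidable (Spec_manifest_contains_archs data desired_architectures out) := by unfold Spec_manifest_contains_archs; infer_instance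

-- ===== CLAIM (what is proved, stated in full; the proofs are below) =====
def Claim_equal_manifest_contains_archs : Prop := ∀ (data : List (String × List (List (String × List (String × String))))) (desired_architectures : List String), Dom_manifest_contains_archs data desired_architectures → Spec_manifest_contains_archs data desired_architectures (manifest_contains_archs data desired_architectures)

-- ===== LEMMAS AND PROOFS =====

-- merge invariant: over nondecreasing keys and strictly increasing need, the pointer reaches
-- the end exactly when every still-pending requirement (need.drop i) occurs among keys
theorem merge_reaches_end_iff (keys : List String) :
    ∀ (need : List String) (i : Nat), keys.Pairwise (· ≤ ·) → need.Pairwise (· < ·) → i ≤ need.length →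
    (keys.foldl (fun i k => if need[i]? = some k then i + 1 else i) i = need.length
      ↔ ∀ a ∈ need.drop i, a ∈ keys) := by
  induction keys with
  | nil =>
    intro need i _ _ hi
    simp only [List.foldl_nil, List.not_mem_nil]
    constructor
    · intro h a ha; rw [h, List.drop_length] at ha; simp at ha
    · intro h
      by_contra hne
      have hlt : i < need.length := lt_of_le_of_ne hi hne
      exact (h need[i] (by rw [← List.getElem_cons_drop hlt]; exact List.mem_cons_self)).elim
  | cons k ks ih =>
    intro need i hk hn hi
    have hk1 : ∀ b ∈ ks, k ≤ b := (List.pairwise_cons.mp hk).1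
    have hk2 : ks.Pairwise (· ≤ ·) := (List.pairwise_cons.mp hk).2
    simp only [List.foldl_cons]
    by_cases h : need[i]? = some k
    · have hlt : i < need.length := by
        by_contra hge
        rw [List.getElem?_eq_none (by omega)] at h; simp at h
      have hik : need[i] = k := by
        rw [List.getElem?_eq_getElem hlt] at h; exact Option.some.inj h
      have hdrop : need.drop i = need[i] :: need.drop (i + 1) :=
        (List.getElem_cons_drop hlt).symm
      have htail : ∀ a ∈ need.drop (i + 1), k < a := by
        intro a ha
        have hp : (need.drop i).Pairwise (· < ·) := hn.drop
        rw [hdrop, List.pairwise_cons] at hp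
        rw [← hik]; exact hp.1 a ha
      rw [if_pos h, ih need (i + 1) hk2 hn (by omega)]
      constructor
      · intro hall a ha
        rw [hdrop] at ha
        rcases List.mem_cons.mp ha with rfl | ha
        · rw [hik]; exact List.mem_cons_self
        · exact List.mem_cons_of_mem _ (hall a ha)
      · intro hall a ha
        have hmem := hall a (by rw [hdrop]; exact List.mem_cons_of_mem _ ha)
        rcases List.mem_cons.mp hmem with rfl | hm
        · exact absurd rfl (ne_of_gt (htail a ha))
        · exact hm
    · rw [if_neg h, ih need i hk2 hn hi]
      constructor
      · intro hall a ha; exact List.mem_cons_of_mem _ (hall a ha)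
      · intro hall a ha
        by_cases hilen : i < need.length
        · have hik : need[i] ≠ k := by
            intro he; exact h (by rw [List.getElem?_eq_getElem hilen, he])
          have hdrop : need.drop i = need[i] :: need.drop (i + 1) :=
            (List.getElem_cons_drop hilen).symm
          have hhead : need[i] ∈ ks := by
            have := hall need[i] (by rw [hdrop]; exact List.mem_cons_self)
            rcases List.mem_cons.mp this with he | hm
            · exact absurd he hik
            · exact hm
          have hkle : k ≤ need[i] := hk1 _ hhead
          have hle : need[i] ≤ a := by
            have hp : (need.drop i).Pairwise (· < ·) := hn.drop
            rw [hdrop, List.pairwise_cons] at hp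
            rcases List.mem_cons.mp (by rw [← hdrop]; exact ha : a ∈ need[i] :: need.drop (i+1)) with rfl | hm
            · exact le_refl _
            · exact le_of_lt (hp.1 a hm)
          rcases List.mem_cons.mp (hall a ha) with rfl | hm
          · exact absurd (le_antisymm hkle hle).symm hik
          · exact hm
        · rw [List.drop_eq_nil_of_le (by omega)] at ha; simp at ha

-- ===== VERDICT (by name: the statement is the Claim_ definition above) =====
theorem manifest_contains_archs_spec : Claim_equal_manifest_contains_archs := by
  intro data desired _
  unfold Spec_manifest_contains_archs manifest_contains_archs manifest_contains_archs_alt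
  cases (PySem.Dict.mk data).get? "manifests" with
  | none => rfl
  | some manifests =>
    dsimp only
    rw [PySem.List.foldl_append_singleton_eq_map]
    set M := manifests.map pvArchKey with hM
    set keys := PySem.List.sorted M (fun x => x) false with hkeys
    set need := PySem.List.sorted (PySem.Set.ofList desired) (fun x => x) false with hneed
    have hks : keys.Pairwise (· ≤ ·) := PySem.List.sorted_pairwise M (fun x => x) 
    have hns : need.Pairwise (· < ·) := PySem.List.sorted_ofList_pairwise_lt desired
    have hm := merge_reaches_end_iff keys need 0 hks hns (Nat.zero_le _)
    rw [List.drop_zero] at hm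
    rw [Bool.eq_iff_iff]
    simp only [List.all_eq_true, beq_iff_eq, List.contains_eq_mem, decide_eq_true_eq]
    rw [hm]
    constructor
    · intro h a ha
      have : a ∈ desired := by
        rw [hneed, PySem.List.mem_sorted] at ha
        exact (PySem.Set.mem_ofList _ _).mp ha
      rw [hkeys, PySem.List.mem_sorted]
      exact h a this
    · intro h a ha
      have : a ∈ keys := h a (by rw [hneed, PySem.List.mem_sorted]; exact (PySem.Set.mem_ofList _ _).mpr ha)
      rw [hkeys, PySem.List.mem_sorted] at this
      exact this
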